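-- pv_equiv track=rewrite | github.com/elmihailol/neural_seinfeld | conv1_detector_queue_trump.py | prepare_word
-- ===== SOURCE A (Python) =====
-- def prepare_word(text, n=20):
--     text = text.lower()
--     text_len = len(text)
--     while text_len < n:
--         text += " "
--         text_len = len(text)
--     text = text[:n]
--     return text
-- ===== SOURCE B (Python) =====
-- def prepare_word(text, n=20):
--     return text.lower().ljust(max(n, 0))[:n]
-- ===== Notes on version B (the rewrite author's own statement) =====
-- stated objective: simpler
-- what changed: Replaces the incremental while-loop that appends one space at a time with a single closed-form ljust padding followed by the same slice.
import Mathlib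
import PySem

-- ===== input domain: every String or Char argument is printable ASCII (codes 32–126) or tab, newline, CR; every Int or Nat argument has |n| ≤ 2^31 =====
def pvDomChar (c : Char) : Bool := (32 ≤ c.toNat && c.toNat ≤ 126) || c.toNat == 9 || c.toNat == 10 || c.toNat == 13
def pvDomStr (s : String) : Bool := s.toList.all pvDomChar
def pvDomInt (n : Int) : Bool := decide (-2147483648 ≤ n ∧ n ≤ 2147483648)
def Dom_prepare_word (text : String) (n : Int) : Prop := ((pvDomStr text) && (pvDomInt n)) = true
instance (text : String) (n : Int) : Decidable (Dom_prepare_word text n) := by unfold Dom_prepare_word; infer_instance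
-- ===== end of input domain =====

-- B replaces A's one-space-at-a-time while loop by a single closed-form ljust pad plus the same slice (simpler).

-- ===== PORT A =====
-- the while loop: while text_len < n: text += " "; text_len = len(text)
def prepare_word_padLoop (t : List Char) (n : Int) : List Char :=
  if PySem.Chars.len t < n then
    prepare_word_padLoop (t ++ [' ']) n
  else t
termination_by (n - (t.length : Int)).toNat
decreasing_by simp_all [PySem.Chars.len]; omega

def prepare_word (text : String) (n : Int) : String :=
  let t := (PySem.Str.lower text).toList
  let t2 := prepare_word_padLoop t n
  String.ofList (PySem.List.slice t2 none (some n))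

-- ===== PORT B =====
def prepare_word_alt (text : String) (n : Int) : String :=
  let t := (PySem.Str.lower text).toList
  -- ljust(max(n,0)) = pad with spaces up to max(n,0) characters
  let padded := t ++ List.replicate ((max n 0) - t.length).toNat ' '
  String.ofList (PySem.List.slice padded none (some n))

-- ===== PRECONDITION & SPEC =====
def Spec_prepare_word (text : String) (n : Int) (out : String) : Prop := out = prepare_word_alt text n
instance (text : String) (n : Int) (out : String) : Decidable (Spec_prepare_word text n out) := by unfold Spec_prepare_word; infer_instance

-- ===== CLAIM (what is proved, stated in full; the proofs are below) =====
def Claim_equal_prepare_word : Prop := ∀ (text : String) (n : Int), Dom_prepare_word text n → Spec_prepare_word text n (prepare_word text n)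

-- ===== LEMMAS AND PROOFS =====

theorem prepare_word_padLoop_closed (t : List Char) (n : Int) :
    prepare_word_padLoop t n
      = t ++ List.replicate ((max n 0) - t.length).toNat ' ' := by
  by_cases h : (t.length : Int) < n
  · rw [prepare_word_padLoop.eq_def]
    simp only [PySem.Chars.len_eq, h, if_pos]
    rw [prepare_word_padLoop_closed (t ++ [' ']) n]
    have hk : ((max n 0) - (t.length : Int)).toNat
        = ((max n 0) - ((t ++ [' ']).length : Int)).toNat + 1 := by
      simp only [List.length_append, List.length_cons, List.length_nil]
      omega
    rw [hk, List.replicate_succ]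
    simp
  · rw [prepare_word_padLoop.eq_def]
    simp only [PySem.Chars.len_eq, h, if_neg, not_false_iff]
    have : ((max n 0) - (t.length : Int)).toNat = 0 := by omega
    simp [this]
termination_by (n - (t.length : Int)).toNat
decreasing_by simp; omega

-- ===== VERDICT (by name: the statement is the Claim_ definition above) =====
theorem prepare_word_spec : Claim_equal_prepare_word := by
  intro text n _
  unfold Spec_prepare_word prepare_word prepare_word_alt
  simp only [PySem.Chars.len_eq]
  rw [prepare_word_padLoop_closed]
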